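-- pv_equiv track=rewrite | github.com/ZAINAZHAR303/MetaHackerCup_2025 | round1/a2code.py | shortest_ladder_length
-- ===== SOURCE A (Python) =====
-- from collections import deque
--
-- def can_reach_all(heights, ladder_length):
--     n = len(heights)
--     visited = [False] * n
--     queue = deque()
--     for i in range(n):
--         if heights[i] <= ladder_length:
--             queue.append(i)
--             visited[i] = True
--     while queue:
--         current = queue.popleft()
--         for neighbor in [current - 1, current + 1]:
--             if 0 <= neighbor < n and not visited[neighbor]:
--                 if abs(heights[current] - heights[neighbor]) <= ladder_length:
--                     visited[neighbor] = True
--                     queue.append(neighbor)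
--     return all(visited)
--
-- def shortest_ladder_length(heights):
--     left, right = 0, max(heights)
--     while left < right:
--         mid = (left + right) // 2
--         if can_reach_all(heights, mid):
--             right = mid
--         else:
--             left = mid + 1
--     return left
-- ===== SOURCE B (Python) =====
-- def shortest_ladder_length(heights):
--     # Two-pass DP closed form: answer = max over cells j of the cheapest
--     # "reach cost" min(f[j], g[j]), where f/g are prefix/suffix bottleneck costs.
--     n = len(heights)
--     f = []
--     for j in range(n):
--         c = heights[j]
--         if j > 0:
--             c = min(c, max(f[j - 1], abs(heights[j] - heights[j - 1])))
--         f.append(c)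
--     g = [0] * n
--     for j in range(n - 1, -1, -1):
--         c = heights[j]
--         if j < n - 1:
--             c = min(c, max(g[j + 1], abs(heights[j] - heights[j + 1])))
--         g[j] = c
--     ans = 0
--     for j in range(n):
--         ans = max(ans, min(f[j], g[j]))
--     return ans
-- ===== Notes on version B (the rewrite author's own statement) =====
-- stated objective: faster
-- what changed: Replaced A's binary search over ladder lengths (each probe running a BFS feasibility check) by a closed-form two-pass O(n) dynamic program: f[j]/g[j] are the cheapest bottleneck costs of reaching cell j from a start cell on its left/right, and the answer is max(0, max_j min(f[j], g[j])).
-- outside the precondition, e.g. on shortest_ladder_length([]): A raises ValueError, B returns 0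
import Mathlib
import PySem

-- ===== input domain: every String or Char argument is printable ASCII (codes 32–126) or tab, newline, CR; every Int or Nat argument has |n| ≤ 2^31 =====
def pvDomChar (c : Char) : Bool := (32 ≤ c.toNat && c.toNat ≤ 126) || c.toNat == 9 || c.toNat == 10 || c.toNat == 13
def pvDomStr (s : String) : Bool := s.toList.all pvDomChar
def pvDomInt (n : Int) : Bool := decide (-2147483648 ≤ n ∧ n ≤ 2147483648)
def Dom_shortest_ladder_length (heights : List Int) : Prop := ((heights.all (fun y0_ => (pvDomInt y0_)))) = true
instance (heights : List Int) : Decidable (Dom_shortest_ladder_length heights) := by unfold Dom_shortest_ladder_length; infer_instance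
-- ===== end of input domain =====

-- B replaces A's binary search + BFS feasibility probes by a two-pass O(n) bottleneck DP
-- (measured faster); return-value equivalence on non-empty lists, A raises ValueError on [].

-- ===== PORT A =====

-- termination helper for the BFS loop (cited by pvBfs's decreasing_by)
theorem pv_count_set (v : List Bool) (i : Nat) (h : v.getD i true = false) :
    (v.set i true).count false + 1 = v.count false := by
  induction v generalizing i with
  | nil => simp [List.getD] at h
  | cons a t ih =>
    cases i with
    | zero =>
      simp [List.getD] at h
      simp [h]
    | succ j =>
      simp [List.getD] at h
      have := ih j (by simpa [List.getD] using h)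
      simp [List.count_cons, List.set]
      omega

-- one neighbour probe of A's BFS inner loop: the body of
-- 'if 0 <= neighbor < n and not visited[neighbor]: if abs(...) <= L: ...'
def pvStep (heights : List Int) (L : Int) (current nb : Int)
    (vq : List Bool × List Int) : List Bool × List Int :=
  if 0 ≤ nb ∧ nb < (heights.length : Int) ∧ vq.1.getD nb.toNat true = false then
    if |heights.getD current.toNat 0 - heights.getD nb.toNat 0| ≤ L then
      (vq.1.set nb.toNat true, vq.2 ++ [nb])
    else vq
  else vq

theorem pvStep_measure (heights : List Int) (L : Int) (current nb : Int)
    (vq : List Bool × List Int) :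
    2 * (pvStep heights L current nb vq).1.count false + (pvStep heights L current nb vq).2.length
      ≤ 2 * vq.1.count false + vq.2.length := by
  unfold pvStep
  split_ifs with h1 h2
  · have := pv_count_set vq.1 nb.toNat h1.2.2
    simp
    omega
  · exact le_rfl
  · exact le_rfl

-- A's 'while queue:' loop
def pvBfs (heights : List Int) (L : Int) (visited : List Bool) (queue : List Int) : List Bool :=
  match queue with
  | [] => visited
  | current :: rest =>
    let s1 := pvStep heights L current (current - 1) (visited, rest)
    let s2 := pvStep heights L current (current + 1) s1
    pvBfs heights L s2.1 s2.2
termination_by 2 * visited.count false + queue.length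
decreasing_by
  have h1 := pvStep_measure heights L current (current - 1) (visited, rest)
  have h2 := pvStep_measure heights L current (current + 1)
      (pvStep heights L current (current - 1) (visited, rest))
  simp only [List.length_cons] at *
  omega

-- can_reach_all: seed loop, BFS loop, then all(visited)
def canReachAll (heights : List Int) (L : Int) : Bool :=
  let n := heights.length
  let init := (List.range n).foldl
    (fun (vq : List Bool × List Int) i =>
      if heights.getD i 0 ≤ L then (vq.1.set i true, vq.2 ++ [(i : Int)]) else vq)
    (List.replicate n false, ([] : List Int))
  (pvBfs heights L init.1 init.2).all (fun b => b)

-- A's binary-search 'while left < right:' loop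
def pvSearch (heights : List Int) (left right : Int) : Int :=
  if h : left < right then
    let mid := PySem.Int.floordiv (left + right) 2
    if canReachAll heights mid then pvSearch heights left mid
    else pvSearch heights (mid + 1) right
  else left
termination_by (right - left).toNat
decreasing_by
  · have hb := PySem.Int.floordiv_two_mid_bounds (le_of_lt h)
    have hlt : PySem.Int.floordiv (left + right) 2 < right := by
      have := PySem.Int.floordiv_lt_iff_lt_mul (a := left + right) (b := 2) (q := right) (by omega)
      omega
    omega
  · have hb := PySem.Int.floordiv_two_mid_bounds (le_of_lt h)
    omega

def shortest_ladder_length (heights : List Int) : Int :=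
  match PySem.List.max? heights (fun x => x) with
  | none => 0   -- Python: max([]) raises ValueError; excluded by Pre_
  | some m => pvSearch heights 0 m

-- ===== PORT B =====

def shortest_ladder_length_alt (heights : List Int) : Int :=
  let n := heights.length
  -- f[j]: cheapest bottleneck cost reaching cell j from some start cell i ≤ j
  let f := (List.range n).foldl
    (fun (f : List Int) j =>
      let c := heights.getD j 0
      let c := if 0 < j then
          min c (max (f.getD (j - 1) 0) |heights.getD j 0 - heights.getD (j - 1) 0|)
        else c
      f ++ [c]) []
  -- g[j]: same from the right; range(n-1, -1, -1) is List.range reversed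
  let g := ((List.range n).reverse).foldl
    (fun (g : List Int) j =>
      let c := heights.getD j 0
      let c := if j < n - 1 then
          min c (max (g.getD (j + 1) 0) |heights.getD j 0 - heights.getD (j + 1) 0|)
        else c
      g.set j c) (List.replicate n 0)
  (List.range n).foldl (fun ans j => max ans (min (f.getD j 0) (g.getD j 0))) 0

-- ===== PRECONDITION & SPEC =====
-- Pre_ excludes only the empty list, on which Python A raises ValueError (max([])).
def Pre_shortest_ladder_length (heights : List Int) : Prop := heights ≠ []
instance (heights : List Int) : Decidable (Pre_shortest_ladder_length heights) := by
  unfold Pre_shortest_ladder_length; infer_instance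

def pvWitness_shortest_ladder_length : List Int := [3, 1, 4]

def Spec_shortest_ladder_length (heights : List Int) (out : Int) : Prop :=
  out = shortest_ladder_length_alt heights
instance (heights : List Int) (out : Int) : Decidable (Spec_shortest_ladder_length heights out) := by
  unfold Spec_shortest_ladder_length; infer_instance

-- ===== CLAIM =====
def Claim_equal_shortest_ladder_length : Prop :=
  ∀ (heights : List Int), Dom_shortest_ladder_length heights →
    Pre_shortest_ladder_length heights →
    Spec_shortest_ladder_length heights (shortest_ladder_length heights)

-- ===== LEMMAS AND PROOFS =====

-- abbreviations for the proofs
def pvH (heights : List Int) (k : Nat) : Int := heights.getD k 0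
def pvD (heights : List Int) (k : Nat) : Int := |pvH heights (k + 1) - pvH heights k|
def pvVIS (v : List Bool) (i : Nat) : Prop := v.getD i false = true

-- cell j is reachable with ladder L from a start cell on its left / right
def GoodLe (heights : List Int) (L : Int) (j : Nat) : Prop :=
  ∃ i, i ≤ j ∧ pvH heights i ≤ L ∧ ∀ k, i ≤ k → k < j → pvD heights k ≤ L
def GoodGe (heights : List Int) (L : Int) (j : Nat) : Prop :=
  ∃ i, j ≤ i ∧ i < heights.length ∧ pvH heights i ≤ L ∧ ∀ k, j ≤ k → k < i → pvD heights k ≤ L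
def Good (heights : List Int) (L : Int) (j : Nat) : Prop :=
  GoodLe heights L j ∨ GoodGe heights L j
def Feasible (heights : List Int) (L : Int) : Prop :=
  ∀ j, j < heights.length → Good heights L j

theorem pv_getD_set {α : Type} (l : List α) (i t : Nat) (c d : α) :
    (l.set i c).getD t d = if t = i ∧ i < l.length then c else l.getD t d := by
  split_ifs with h
  · rcases h with ⟨rfl, hi⟩
    rw [List.getD_eq_getElem _ _ (by simpa using hi)]
    simp [List.getElem_set_self]
  · by_cases ht : t < l.length
    · rw [List.getD_eq_getElem _ _ (by simpa using ht), List.getD_eq_getElem _ _ ht]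
      rw [List.getElem_set]
      split_ifs with h2
      · exact absurd ⟨h2.symm, by omega⟩ h
      · rfl
    · rw [List.getD_eq_default _ _ (by simpa using (by omega : l.length ≤ t)),
        List.getD_eq_default _ _ (by omega)]

theorem pvVIS_set (v : List Bool) (m i : Nat) :
    pvVIS (v.set m true) i ↔ ((i = m ∧ m < v.length) ∨ pvVIS v i) := by
  unfold pvVIS
  rw [pv_getD_set]
  split_ifs with h
  · simp [h]
  · constructor
    · exact Or.inr
    · rintro (h2 | h2)
      · exact absurd h2 h
      · exact h2

theorem good_extend (heights : List Int) (L : Int) (i j : Nat)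
    (hi : Good heights L i) (hin : i < heights.length) (hj : j < heights.length)
    (hadj : j = i + 1 ∨ i = j + 1)
    (hedge : |pvH heights i - pvH heights j| ≤ L) : Good heights L j := by
  rcases hadj with rfl | rfl
  · -- j = i + 1
    have hd : pvD heights i ≤ L := by
      unfold pvD; rw [abs_sub_comm]; exact hedge
    rcases hi with ⟨w, hw, hwh, hpath⟩ | ⟨w, hw, hwn, hwh, hpath⟩
    · exact Or.inl ⟨w, by omega, hwh, fun k hk1 hk2 => by
        rcases Nat.lt_or_ge k i with h | h
        · exact hpath k hk1 h
        · have hki : k = i := by omega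
          rw [hki]; exact hd⟩
    · rcases Nat.lt_or_ge w (i + 1) with h | h
      · have hwi : w = i := by omega
        exact Or.inl ⟨i, by omega, hwi ▸ hwh, fun k hk1 hk2 => by
          have hki : k = i := by omega
          rw [hki]; exact hd⟩
      · exact Or.inr ⟨w, h, hwn, hwh, fun k hk1 hk2 => hpath k (by omega) hk2⟩
  · -- i = j + 1
    have hd : pvD heights j ≤ L := by
      unfold pvD; exact hedge
    rcases hi with ⟨w, hw, hwh, hpath⟩ | ⟨w, hw, hwn, hwh, hpath⟩
    · rcases Nat.lt_or_ge w (j + 1) with h | h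
      · exact Or.inl ⟨w, by omega, hwh, fun k hk1 hk2 => hpath k hk1 (by omega)⟩
      · have hwj : w = j + 1 := by omega
        exact Or.inr ⟨j + 1, by omega, hin, hwj ▸ hwh, fun k hk1 hk2 => by
          have hkj : k = j := by omega
          rw [hkj]; exact hd⟩
    · exact Or.inr ⟨w, by omega, hwn, hwh, fun k hk1 hk2 => by
        rcases Nat.lt_or_ge k (j + 1) with h | h
        · have hkj : k = j := by omega
          rw [hkj]; exact hd
        · exact hpath k h hk2⟩

-- case analysis of one neighbour probe
theorem pvStep_spec (heights : List Int) (L current nb : Int) (v : List Bool) (q : List Int)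
    (hv : v.length = heights.length) :
    (pvStep heights L current nb (v, q) = (v, q) ∧
      (0 ≤ nb → nb < (heights.length : Int) →
        |pvH heights current.toNat - pvH heights nb.toNat| ≤ L → pvVIS v nb.toNat))
    ∨ (0 ≤ nb ∧ nb < (heights.length : Int) ∧ ¬ pvVIS v nb.toNat ∧
        nb.toNat < heights.length ∧
        |pvH heights current.toNat - pvH heights nb.toNat| ≤ L ∧
        pvStep heights L current nb (v, q) = (v.set nb.toNat true, q ++ [nb])) := by
  unfold pvStep pvH pvVIS
  split_ifs with h1 h2
  · right
    obtain ⟨ha, hb, hc⟩ := h1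
    have hlt : nb.toNat < heights.length := by omega
    have hlt2 : nb.toNat < v.length := by omega
    refine ⟨ha, hb, ?_, hlt, h2, rfl⟩
    intro hvis
    rw [List.getD_eq_getElem v true hlt2] at hc
    rw [List.getD_eq_getElem v false hlt2, hc] at hvis
    exact Bool.noConfusion hvis
  · left
    exact ⟨rfl, fun ha hb he => absurd he h2⟩
  · left
    refine ⟨rfl, fun ha hb he => ?_⟩
    push Not at h1
    have hlt2 : nb.toNat < v.length := by omega
    have h3 : v.getD nb.toNat true = true := by simpa using h1 ha hb
    rw [List.getD_eq_getElem v true hlt2] at h3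
    rw [List.getD_eq_getElem v false hlt2]
    exact h3

theorem pvStep_len (heights : List Int) (L current nb : Int) (v : List Bool) (q : List Int) :
    (pvStep heights L current nb (v, q)).1.length = v.length := by
  unfold pvStep; split_ifs <;> simp

theorem pvStep_queue_sup (heights : List Int) (L current nb : Int) (v : List Bool)
    (q : List Int) (x : Int) (h : x ∈ q) : x ∈ (pvStep heights L current nb (v, q)).2 := by
  unfold pvStep; split_ifs <;> simp [h]

theorem pvStep_ensures (heights : List Int) (L current nb : Int) (v : List Bool) (q : List Int)
    (hv : v.length = heights.length) (h0 : 0 ≤ nb) (h1 : nb < (heights.length : Int))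
    (he : |pvH heights current.toNat - pvH heights nb.toNat| ≤ L) :
    pvVIS (pvStep heights L current nb (v, q)).1 nb.toNat := by
  rcases pvStep_spec heights L current nb v q hv with ⟨heq, himp⟩ | ⟨_, _, _, hlt, _, heq⟩
  · rw [heq]; exact himp h0 h1 he
  · rw [heq]; exact (pvVIS_set v nb.toNat nb.toNat).2 (Or.inl ⟨rfl, by omega⟩)

def ClosedAt (heights : List Int) (L : Int) (v : List Bool) (i : Nat) : Prop :=
  (i + 1 < heights.length → pvD heights i ≤ L → pvVIS v (i + 1)) ∧
  (∀ j, i = j + 1 → pvD heights j ≤ L → pvVIS v j)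

def pvInv (heights : List Int) (L : Int) (v : List Bool) (q : List Int) : Prop :=
  v.length = heights.length ∧
  (∀ x ∈ q, ∃ i : Nat, i < heights.length ∧ x = (i : Int) ∧ pvVIS v i) ∧
  (∀ i, i < heights.length → pvVIS v i → Good heights L i) ∧
  (∀ i, i < heights.length → pvVIS v i → ((i : Int) ∈ q ∨ ClosedAt heights L v i))

-- one neighbour probe preserves lengths, soundness and the queue discipline
theorem pvStep_preserve (heights : List Int) (L current nb : Int) (v : List Bool)
    (q : List Int) (i0 : Nat)
    (hv : v.length = heights.length)
    (hq : ∀ x ∈ q, ∃ i : Nat, i < heights.length ∧ x = (i : Int) ∧ pvVIS v i)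
    (hsound : ∀ i, i < heights.length → pvVIS v i → Good heights L i)
    (hc0 : i0 < heights.length) (hceq : current = (i0 : Int)) (hcg : Good heights L i0)
    (hadj : nb = current - 1 ∨ nb = current + 1) :
    (pvStep heights L current nb (v, q)).1.length = heights.length ∧
    (∀ i, pvVIS v i → pvVIS (pvStep heights L current nb (v, q)).1 i) ∧
    (∀ x ∈ (pvStep heights L current nb (v, q)).2,
      ∃ i : Nat, i < heights.length ∧ x = (i : Int) ∧ pvVIS (pvStep heights L current nb (v, q)).1 i) ∧
    (∀ i, i < heights.length → pvVIS (pvStep heights L current nb (v, q)).1 i → Good heights L i) ∧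
    (∀ i, i < heights.length → pvVIS (pvStep heights L current nb (v, q)).1 i → ¬ pvVIS v i →
      (i : Int) ∈ (pvStep heights L current nb (v, q)).2) := by
  have hlen : (pvStep heights L current nb (v, q)).1.length = v.length :=
    pvStep_len heights L current nb v q
  rcases pvStep_spec heights L current nb v q hv with ⟨heq, _⟩ |
      ⟨ha, hb, hnv, hlt, he, heq⟩
  · rw [heq]
    exact ⟨hv, fun i h => h, hq, hsound, fun i _ h1 h2 => absurd h1 h2⟩
  · have hGoodNb : Good heights L nb.toNat := by
      refine good_extend heights L i0 nb.toNat hcg hc0 hlt ?_ ?_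
      · rcases hadj with rfl | rfl <;> omega
      · have : current.toNat = i0 := by omega
        rw [← this]; exact he
    rw [heq]
    refine ⟨by simp [hv], ?_, ?_, ?_, ?_⟩
    · intro i h; exact (pvVIS_set v nb.toNat i).2 (Or.inr h)
    · intro x hx
      simp only [List.mem_append, List.mem_singleton] at hx
      rcases hx with hx | hxeq
      · obtain ⟨i, h1, h2, h3⟩ := hq x hx
        exact ⟨i, h1, h2, (pvVIS_set v nb.toNat i).2 (Or.inr h3)⟩
      · exact ⟨nb.toNat, hlt, by omega, (pvVIS_set v nb.toNat nb.toNat).2 (Or.inl ⟨rfl, by omega⟩)⟩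
    · intro i hi hvis
      rcases (pvVIS_set v nb.toNat i).1 hvis with ⟨rfl, _⟩ | h
      · exact hGoodNb
      · exact hsound i hi h
    · intro i hi hvis hnvis
      rcases (pvVIS_set v nb.toNat i).1 hvis with ⟨rfl, _⟩ | h
      · simp; omega
      · exact absurd h hnvis

theorem closedAt_mono (heights : List Int) (L : Int) (v w : List Bool) (i : Nat)
    (hmono : ∀ t, pvVIS v t → pvVIS w t) (h : ClosedAt heights L v i) :
    ClosedAt heights L w i :=
  ⟨fun h1 h2 => hmono _ (h.1 h1 h2), fun j h1 h2 => hmono _ (h.2 j h1 h2)⟩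

theorem pvBfs_post (heights : List Int) (L : Int) (v : List Bool) (q : List Int)
    (hInv : pvInv heights L v q) :
    (pvBfs heights L v q).length = heights.length ∧
    (∀ i, pvVIS v i → pvVIS (pvBfs heights L v q) i) ∧
    (∀ i, i < heights.length → pvVIS (pvBfs heights L v q) i → Good heights L i) ∧
    (∀ i, i < heights.length → pvVIS (pvBfs heights L v q) i →
      ClosedAt heights L (pvBfs heights L v q) i) := by
  induction v, q using pvBfs.induct heights L with
  | case1 v =>
    obtain ⟨h1, h2, h3, h4⟩ := hInv
    rw [pvBfs]
    refine ⟨h1, fun i h => h, h3, ?_⟩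
    intro i hi hvis
    rcases h4 i hi hvis with h | h
    · simp at h
    · exact h
  | case2 v current rest s1 s2 ih =>
    obtain ⟨h1, h2, h3, h4⟩ := hInv
    obtain ⟨i0, hi0, hceq, hvis0⟩ := h2 current (by simp)
    have hcg : Good heights L i0 := h3 i0 hi0 hvis0
    -- step 1: neighbour current - 1
    obtain ⟨s1len, s1mono, s1q, s1sound, s1new⟩ :=
      pvStep_preserve heights L current (current - 1) v rest i0 h1
        (fun x hx => h2 x (by simp [hx])) h3 hi0 hceq hcg (Or.inl rfl)
    -- step 2: neighbour current + 1
    obtain ⟨s2len, s2mono, s2q, s2sound, s2new⟩ :=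
      pvStep_preserve heights L current (current + 1)
        (pvStep heights L current (current - 1) (v, rest)).1
        (pvStep heights L current (current - 1) (v, rest)).2 i0 s1len
        s1q s1sound hi0 hceq hcg (Or.inr rfl)
    have hInv2 : pvInv heights L
        (pvStep heights L current (current + 1) (pvStep heights L current (current - 1) (v, rest))).1
        (pvStep heights L current (current + 1) (pvStep heights L current (current - 1) (v, rest))).2 := by
      refine ⟨by simpa using s2len, by simpa using s2q, by simpa using s2sound, ?_⟩
      intro i hi hvis
      by_cases hold : pvVIS v i
      · rcases h4 i hi hold with hq | hcl
        · simp only [List.mem_cons] at hq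
          rcases hq with hq | hq
          · -- i is the popped current: both neighbours were just probed
            have hieq : i = i0 := by omega
            subst hieq
            right
            constructor
            · intro hup hd
              have := pvStep_ensures heights L current (current + 1)
                (pvStep heights L current (current - 1) (v, rest)).1
                (pvStep heights L current (current - 1) (v, rest)).2 s1len
                (by omega) (by omega) (by
                  have h5 : (current + 1).toNat = i + 1 := by omega
                  have h6 : current.toNat = i := by omega
                  rw [h5, h6]
                  unfold pvD at hd
                  rw [abs_sub_comm] at hd
                  exact hd)
              have h5 : (current + 1).toNat = i + 1 := by omega
              rw [h5] at this
              simpa using this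
            · intro j hj hd
              have := pvStep_ensures heights L current (current - 1) v rest h1
                (by omega) (by omega) (by
                  have h5 : (current - 1).toNat = j := by omega
                  have h6 : current.toNat = i := by omega
                  rw [h5, h6, hj]
                  unfold pvD at hd
                  exact hd)
              have h5 : (current - 1).toNat = j := by omega
              rw [h5] at this
              exact s2mono j this
          · -- i sits in the remaining queue
            left
            apply pvStep_queue_sup
            exact pvStep_queue_sup heights L current (current - 1) v rest _ hq
        · right
          exact closedAt_mono heights L v _ i (fun t ht => s2mono t (s1mono t ht)) hcl
      · -- i was newly visited by one of the two probes
        by_cases hmid : pvVIS (pvStep heights L current (current - 1) (v, rest)).1 i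
        · left
          exact pvStep_queue_sup heights L current (current + 1) _ _ _ (s1new i hi hmid hold)
        · left
          exact s2new i hi hvis hmid
    obtain ⟨r1, r2, r3, r4⟩ := ih hInv2
    rw [pvBfs]
    exact ⟨r1, fun i h => r2 i (s2mono i (s1mono i h)), r3, r4⟩

-- the seed loop of can_reach_all
def pvSeed (heights : List Int) (L : Int) (m : Nat) : List Bool × List Int :=
  (List.range m).foldl
    (fun (vq : List Bool × List Int) i =>
      if heights.getD i 0 ≤ L then (vq.1.set i true, vq.2 ++ [(i : Int)]) else vq)
    (List.replicate heights.length false, ([] : List Int))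

theorem pvSeed_spec (heights : List Int) (L : Int) (m : Nat) (hm : m ≤ heights.length) :
    (pvSeed heights L m).1.length = heights.length ∧
    (∀ i, pvVIS (pvSeed heights L m).1 i ↔ (i < m ∧ pvH heights i ≤ L)) ∧
    (∀ x, x ∈ (pvSeed heights L m).2 ↔ ∃ i : Nat, i < m ∧ x = (i : Int) ∧ pvH heights i ≤ L) := by
  induction m with
  | zero =>
    exact ⟨by simp [pvSeed], fun i => by simp [pvSeed, pvVIS], by simp [pvSeed]⟩
  | succ m ih =>
    obtain ⟨ih1, ih2, ih3⟩ := ih (by omega)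
    have hstep : pvSeed heights L (m + 1) =
        (if heights.getD m 0 ≤ L
          then ((pvSeed heights L m).1.set m true, (pvSeed heights L m).2 ++ [(m : Int)])
          else pvSeed heights L m) := by
      unfold pvSeed
      rw [List.range_succ, List.foldl_append]
      simp
    rw [hstep]
    split_ifs with hh
    · refine ⟨by simpa using ih1, ?_, ?_⟩
      · intro i
        rw [show ((pvSeed heights L m).1.set m true, (pvSeed heights L m).2 ++ [(m : Int)]).1
            = (pvSeed heights L m).1.set m true from rfl]
        rw [pvVIS_set]
        rw [ih1]
        constructor
        · rintro (⟨rfl, _⟩ | h)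
          · exact ⟨by omega, hh⟩
          · have := (ih2 i).1 h
            exact ⟨by omega, this.2⟩
        · rintro ⟨hi, hL⟩
          rcases Nat.lt_or_ge i m with h | h
          · exact Or.inr ((ih2 i).2 ⟨h, hL⟩)
          · have : i = m := by omega
            subst this
            exact Or.inl ⟨rfl, by omega⟩
      · intro x
        simp only [List.mem_append, List.mem_singleton, ih3]
        constructor
        · rintro (⟨i, h1, h2, h3⟩ | rfl)
          · exact ⟨i, by omega, h2, h3⟩
          · exact ⟨m, by omega, rfl, hh⟩
        · rintro ⟨i, h1, h2, h3⟩
          rcases Nat.lt_or_ge i m with h | h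
          · exact Or.inl ⟨i, h, h2, h3⟩
          · have : i = m := by omega
            subst this
            exact Or.inr h2
    · refine ⟨ih1, ?_, ?_⟩
      · intro i
        rw [ih2]
        constructor
        · rintro ⟨h1, h2⟩; exact ⟨by omega, h2⟩
        · rintro ⟨h1, h2⟩
          refine ⟨?_, h2⟩
          rcases Nat.lt_or_ge i m with h | h
          · exact h
          · have : i = m := by omega
            subst this
            exact absurd h2 hh
      · intro x
        rw [ih3]
        constructor
        · rintro ⟨i, h1, h2, h3⟩; exact ⟨i, by omega, h2, h3⟩
        · rintro ⟨i, h1, h2, h3⟩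
          refine ⟨i, ?_, h2, h3⟩
          rcases Nat.lt_or_ge i m with h | h
          · exact h
          · have : i = m := by omega
            subst this
            exact absurd h3 hh

theorem walk_up (heights : List Int) (L : Int) (r : List Bool)
    (hclosed : ∀ i, i < heights.length → pvVIS r i → ClosedAt heights L r i) :
    ∀ d i j, j = i + d → j < heights.length → pvVIS r i →
      (∀ k, i ≤ k → k < j → pvD heights k ≤ L) → pvVIS r j := by
  intro d
  induction d with
  | zero => intro i j hj _ hv _; rw [hj]; simpa using hv
  | succ d ih =>
    intro i j hj hjn hv hpath
    have hmid : pvVIS r (i + d) := ih i (i + d) rfl (by omega) hv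
      (fun k h1 h2 => hpath k h1 (by omega))
    have := (hclosed (i + d) (by omega) hmid).1 (by omega) (hpath (i + d) (by omega) (by omega))
    rw [hj]
    simpa using this

theorem walk_down (heights : List Int) (L : Int) (r : List Bool)
    (hclosed : ∀ i, i < heights.length → pvVIS r i → ClosedAt heights L r i) :
    ∀ d j i, i = j + d → i < heights.length → pvVIS r i →
      (∀ k, j ≤ k → k < i → pvD heights k ≤ L) → pvVIS r j := by
  intro d
  induction d with
  | zero => intro j i hi _ hv _; rw [hi] at hv; simpa using hv
  | succ d ih =>
    intro j i hi hin hv hpath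
    have hmid : pvVIS r (j + 1) := ih (j + 1) i (by omega) hin hv
      (fun k h1 h2 => hpath k (by omega) h2)
    exact (hclosed (j + 1) (by omega) hmid).2 j rfl (hpath j (by omega) (by omega))

theorem canReachAll_iff (heights : List Int) (L : Int) :
    canReachAll heights L = true ↔ Feasible heights L := by
  have hre : canReachAll heights L =
      (pvBfs heights L (pvSeed heights L heights.length).1
        (pvSeed heights L heights.length).2).all (fun b => b) := rfl
  obtain ⟨hs1, hs2, hs3⟩ := pvSeed_spec heights L heights.length le_rfl
  have hInv : pvInv heights L (pvSeed heights L heights.length).1 (pvSeed heights L heights.length).2 := by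
    refine ⟨hs1, ?_, ?_, ?_⟩
    · intro x hx
      obtain ⟨i, h1, h2, h3⟩ := (hs3 x).1 hx
      exact ⟨i, h1, h2, (hs2 i).2 ⟨h1, h3⟩⟩
    · intro i hi hv
      exact Or.inl ⟨i, le_rfl, ((hs2 i).1 hv).2, fun k h1 h2 => by omega⟩
    · intro i hi hv
      obtain ⟨h1, h2⟩ := (hs2 i).1 hv
      exact Or.inl ((hs3 (i : Int)).2 ⟨i, h1, rfl, h2⟩)
  obtain ⟨r1, r2, r3, r4⟩ := pvBfs_post heights L _ _ hInv
  rw [hre]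
  rw [List.all_eq_true]
  constructor
  · intro hall j hj
    apply r3 j hj
    unfold pvVIS
    rw [List.getD_eq_getElem _ _ (by omega)]
    exact hall _ (List.getElem_mem (by omega))
  · intro hfeas b hb
    obtain ⟨j, hjlen, rfl⟩ := List.mem_iff_getElem.1 hb
    have hjn : j < heights.length := by omega
    suffices h : pvVIS (pvBfs heights L (pvSeed heights L heights.length).1
        (pvSeed heights L heights.length).2) j by
      unfold pvVIS at h
      rw [List.getD_eq_getElem _ _ (by omega)] at h
      simpa using h
    rcases hfeas j hjn with ⟨i, h1, h2, h3⟩ | ⟨i, h1, h1n, h2, h3⟩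
    · have hvi : pvVIS (pvBfs heights L (pvSeed heights L heights.length).1
          (pvSeed heights L heights.length).2) i :=
        r2 i ((hs2 i).2 ⟨by omega, h2⟩)
      exact walk_up heights L _ r4 (j - i) i j (by omega) hjn hvi h3
    · have hvi : pvVIS (pvBfs heights L (pvSeed heights L heights.length).1
          (pvSeed heights L heights.length).2) i :=
        r2 i ((hs2 i).2 ⟨h1n, h2⟩)
      exact walk_down heights L _ r4 (i - j) j i (by omega) h1n hvi h3

theorem feasible_mono (heights : List Int) {L L' : Int} (h : L ≤ L')
    (hf : Feasible heights L) : Feasible heights L' := by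
  intro j hj
  rcases hf j hj with ⟨i, h1, h2, h3⟩ | ⟨i, h1, h1', h2, h3⟩
  · exact Or.inl ⟨i, h1, le_trans h2 h, fun k hk1 hk2 => le_trans (h3 k hk1 hk2) h⟩
  · exact Or.inr ⟨i, h1, h1', le_trans h2 h, fun k hk1 hk2 => le_trans (h3 k hk1 hk2) h⟩

theorem canReach_mono (heights : List Int) {x y : Int} (hxy : x ≤ y)
    (hx : canReachAll heights x = true) : canReachAll heights y = true :=
  (canReachAll_iff heights y).2 (feasible_mono heights hxy ((canReachAll_iff heights x).1 hx))

theorem pvSearch_step_pos (heights : List Int) (l r : Int) (hlt : l < r)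
    (hcan : canReachAll heights (PySem.Int.floordiv (l + r) 2) = true) :
    pvSearch heights l r = pvSearch heights l (PySem.Int.floordiv (l + r) 2) := by
  rw [pvSearch, dif_pos hlt]
  exact if_pos hcan

theorem pvSearch_step_neg (heights : List Int) (l r : Int) (hlt : l < r)
    (hcan : ¬ canReachAll heights (PySem.Int.floordiv (l + r) 2) = true) :
    pvSearch heights l r = pvSearch heights (PySem.Int.floordiv (l + r) 2 + 1) r := by
  rw [pvSearch, dif_pos hlt]
  exact if_neg hcan

theorem pvSearch_stop (heights : List Int) (l r : Int) (hlt : ¬ l < r) :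
    pvSearch heights l r = l := by
  rw [pvSearch]
  exact dif_neg hlt

theorem pvSearch_spec_aux (heights : List Int) :
    ∀ (fuel : Nat) (l r : Int), (r - l).toNat ≤ fuel → l ≤ r →
    canReachAll heights r = true →
    l ≤ pvSearch heights l r ∧ pvSearch heights l r ≤ r ∧
    canReachAll heights (pvSearch heights l r) = true ∧
    (∀ x, l ≤ x → x < pvSearch heights l r → canReachAll heights x = false) := by
  intro fuel
  induction fuel with
  | zero =>
    intro l r hk hlr hr
    have hlteq : l = r := by omega
    rw [pvSearch_stop heights l r (by omega)]
    exact ⟨le_rfl, hlr, hlteq ▸ hr, fun x h1 h2 => absurd h2 (by omega)⟩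
  | succ fuel ih =>
    intro l r hk hlr hr
    by_cases hlt : l < r
    · have hb := PySem.Int.floordiv_two_mid_bounds (le_of_lt hlt)
      have hmidlt : PySem.Int.floordiv (l + r) 2 < r := by
        have := PySem.Int.floordiv_lt_iff_lt_mul (a := l + r) (b := 2) (q := r) (by omega)
        omega
      by_cases hcan : canReachAll heights (PySem.Int.floordiv (l + r) 2) = true
      · rw [pvSearch_step_pos heights l r hlt hcan]
        obtain ⟨a, b, c, d⟩ := ih l (PySem.Int.floordiv (l + r) 2) (by omega) hb.1 hcan
        exact ⟨a, by omega, c, d⟩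
      · rw [pvSearch_step_neg heights l r hlt hcan]
        obtain ⟨a, b, c, d⟩ := ih (PySem.Int.floordiv (l + r) 2 + 1) r (by omega) (by omega) hr
        refine ⟨by omega, b, c, ?_⟩
        intro x hx1 hx2
        by_cases h : x ≤ PySem.Int.floordiv (l + r) 2
        · rcases hc : canReachAll heights x with _ | _
          · rfl
          · exact absurd (canReach_mono heights h hc) hcan
        · exact d x (by omega) hx2
    · rw [pvSearch_stop heights l r hlt]
      have hlteq : l = r := by omega
      exact ⟨le_rfl, hlr, hlteq ▸ hr, fun x h1 h2 => absurd h2 (by omega)⟩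

theorem pvSearch_spec (heights : List Int) (l r : Int) (hlr : l ≤ r)
    (hr : canReachAll heights r = true) :
    l ≤ pvSearch heights l r ∧ pvSearch heights l r ≤ r ∧
    canReachAll heights (pvSearch heights l r) = true ∧
    (∀ x, l ≤ x → x < pvSearch heights l r → canReachAll heights x = false) :=
  pvSearch_spec_aux heights (r - l).toNat l r le_rfl hlr hr

-- ===== B side: the two DP passes compute prefix/suffix bottleneck costs =====

def pvF (heights : List Int) : Nat → Int
  | 0 => pvH heights 0
  | j + 1 => min (pvH heights (j + 1)) (max (pvF heights j) (pvD heights j))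

def pvG (heights : List Int) (j : Nat) : Int :=
  if j + 1 < heights.length then
    min (pvH heights j) (max (pvG heights (j + 1)) (pvD heights j))
  else pvH heights j
termination_by heights.length - j

theorem pv_getD_append_lt {α : Type} (l : List α) (c d : α) (j : Nat) (h : j < l.length) :
    (l ++ [c]).getD j d = l.getD j d := by
  rw [List.getD_eq_getElem _ _ (by simp; omega), List.getD_eq_getElem _ _ h]
  exact List.getElem_append_left h

theorem pv_getD_append_len {α : Type} (l : List α) (c d : α) (j : Nat) (h : j = l.length) :
    (l ++ [c]).getD j d = c := by
  subst h
  rw [List.getD_eq_getElem _ _ (by simp)]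
  simp

def pvFoldF (heights : List Int) (m : Nat) : List Int :=
  (List.range m).foldl
    (fun (f : List Int) j =>
      let c := heights.getD j 0
      let c := if 0 < j then
          min c (max (f.getD (j - 1) 0) |heights.getD j 0 - heights.getD (j - 1) 0|)
        else c
      f ++ [c]) []

theorem pvFoldF_spec (heights : List Int) (m : Nat) :
    (pvFoldF heights m).length = m ∧
    (∀ j, j < m → (pvFoldF heights m).getD j 0 = pvF heights j) := by
  induction m with
  | zero => exact ⟨rfl, fun j hj => by omega⟩
  | succ m ih =>
    obtain ⟨ih1, ih2⟩ := ih
    have hstep : pvFoldF heights (m + 1) = pvFoldF heights m ++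
        [if 0 < m then
            min (heights.getD m 0)
              (max ((pvFoldF heights m).getD (m - 1) 0)
                |heights.getD m 0 - heights.getD (m - 1) 0|)
          else heights.getD m 0] := by
      unfold pvFoldF
      rw [List.range_succ, List.foldl_append]
      simp
    rw [hstep]
    refine ⟨by simp [ih1], ?_⟩
    intro j hj
    rcases Nat.lt_or_ge j m with h | h
    · rw [pv_getD_append_lt _ _ _ _ (by omega), ih2 j h]
    · have hjm : j = m := by omega
      subst hjm
      rw [pv_getD_append_len _ _ _ _ ih1.symm]
      cases j with
      | zero => simp [pvF, pvH]
      | succ t =>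
        rw [if_pos (by omega)]
        simp only [Nat.add_sub_cancel]
        rw [ih2 t (by omega)]
        rw [pvF]
        unfold pvD pvH
        rfl

def pvStepG (heights : List Int) (n : Nat) (g : List Int) (j : Nat) : List Int :=
  let c := heights.getD j 0
  let c := if j < n - 1 then
      min c (max (g.getD (j + 1) 0) |heights.getD j 0 - heights.getD (j + 1) 0|)
    else c
  g.set j c

theorem pvFoldG_spec (heights : List Int) :
    ∀ (m : Nat), m ≤ heights.length → ∀ (g : List Int), g.length = heights.length →
    (∀ t, m ≤ t → t < heights.length → g.getD t 0 = pvG heights t) →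
    ((List.range m).foldr (fun j g => pvStepG heights heights.length g j) g).length = heights.length ∧
    (∀ t, t < heights.length →
      ((List.range m).foldr (fun j g => pvStepG heights heights.length g j) g).getD t 0 = pvG heights t) := by
  intro m
  induction m with
  | zero =>
    intro _ g hg hinv
    exact ⟨by simpa using hg, fun t ht => by simpa using hinv t (by omega) ht⟩
  | succ m ih =>
    intro hm g hg hinv
    have hstep : (List.range (m + 1)).foldr (fun j g => pvStepG heights heights.length g j) g =
        (List.range m).foldr (fun j g => pvStepG heights heights.length g j)
          (pvStepG heights heights.length g m) := by
      rw [List.range_succ, List.foldr_append]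
      rfl
    rw [hstep]
    apply ih (by omega)
    · simp [pvStepG]
      omega
    · intro t ht1 ht2
      unfold pvStepG
      simp only
      rcases Nat.lt_or_ge m t with h | h
      · rw [pv_getD_set]
        rw [if_neg (by omega)]
        exact hinv t (by omega) ht2
      · have : t = m := by omega
        subst this
        rw [pv_getD_set, if_pos ⟨rfl, by omega⟩]
        rw [pvG]
        split_ifs with h1 h2
        · rw [hinv (t + 1) (by omega) (by omega)]
          unfold pvD pvH
          rw [abs_sub_comm]
        · omega
        · omega
        · rfl

theorem pv_foldl_max_le (f : Nat → Int) (L : Int) :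
    ∀ (l : List Nat) (a : Int), a ≤ L → (∀ x ∈ l, f x ≤ L) →
      l.foldl (fun acc x => max acc (f x)) a ≤ L := by
  intro l
  induction l with
  | nil => intro a ha _; simpa using ha
  | cons x t ih =>
    intro a ha hall
    simp only [List.foldl_cons]
    exact ih _ (by simp [ha, hall x (by simp)]) (fun y hy => hall y (by simp [hy]))

-- the value of B, in terms of the DP specs
theorem alt_eq (heights : List Int) :
    shortest_ladder_length_alt heights =
      (List.range heights.length).foldl
        (fun ans j => max ans (min (pvF heights j) (pvG heights j))) 0 := by
  have hF := pvFoldF_spec heights heights.length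
  have hG := pvFoldG_spec heights heights.length le_rfl (List.replicate heights.length 0)
    (by simp) (fun t h1 h2 => by omega)
  have hre : shortest_ladder_length_alt heights =
      (List.range heights.length).foldl
        (fun ans j => max ans (min ((pvFoldF heights heights.length).getD j 0)
          (((List.range heights.length).foldr
              (fun j g => pvStepG heights heights.length g j)
              (List.replicate heights.length 0)).getD j 0))) 0 := by
    unfold shortest_ladder_length_alt pvFoldF pvStepG
    rw [← List.foldl_reverse]
  rw [hre]
  apply PySem.List.foldl_congr_mem
  intro acc x hx
  have hxn : x < heights.length := by simpa using hx
  rw [hF.2 x hxn, hG.2 x hxn]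

theorem pvF_good (heights : List Int) (L : Int) :
    ∀ j, j < heights.length → pvF heights j ≤ L → GoodLe heights L j := by
  intro j
  induction j with
  | zero =>
    intro _ h
    exact ⟨0, le_rfl, h, fun k h1 h2 => by omega⟩
  | succ j ih =>
    intro hj h
    rw [pvF] at h
    rcases min_le_iff.1 h with h | h
    · exact ⟨j + 1, le_rfl, h, fun k h1 h2 => by omega⟩
    · rw [max_le_iff] at h
      obtain ⟨i, h1, h2, h3⟩ := ih (by omega) h.1
      refine ⟨i, by omega, h2, fun k hk1 hk2 => ?_⟩
      rcases Nat.lt_or_ge k j with hk | hk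
      · exact h3 k hk1 hk
      · have : k = j := by omega
        subst this
        exact h.2

theorem pvG_good (heights : List Int) (L : Int) :
    ∀ d j, heights.length - j = d → j < heights.length → pvG heights j ≤ L →
      GoodGe heights L j := by
  intro d
  induction d with
  | zero => intro j hd hj _; omega
  | succ d ih =>
    intro j hd hj h
    rw [pvG] at h
    split_ifs at h with h1
    · rcases min_le_iff.1 h with h | h
      · exact ⟨j, le_rfl, hj, h, fun k h1 h2 => by omega⟩
      · rw [max_le_iff] at h
        obtain ⟨i, hh1, hh2, hh3, hh4⟩ := ih (j + 1) (by omega) (by omega) h.1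
        refine ⟨i, by omega, hh2, hh3, fun k hk1 hk2 => ?_⟩
        rcases Nat.lt_or_ge k (j + 1) with hk | hk
        · have : k = j := by omega
          subst this
          exact h.2
        · exact hh4 k hk hk2
    · exact ⟨j, le_rfl, hj, h, fun k h1 h2 => by omega⟩

theorem good_pvF (heights : List Int) (L : Int) :
    ∀ j i, i ≤ j → pvH heights i ≤ L → (∀ k, i ≤ k → k < j → pvD heights k ≤ L) →
      pvF heights j ≤ L := by
  intro j
  induction j with
  | zero =>
    intro i hi hL _
    have : i = 0 := by omega
    subst this
    simpa [pvF] using hL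
  | succ j ih =>
    intro i hi hL hpath
    rcases Nat.lt_or_ge j i with h | h
    · have : i = j + 1 := by omega
      subst this
      rw [pvF]
      exact le_trans (min_le_left _ _) hL
    · have h1 : pvF heights j ≤ L := ih i h hL (fun k hk1 hk2 => hpath k hk1 (by omega))
      have h2 : pvD heights j ≤ L := hpath j h (by omega)
      rw [pvF]
      exact le_trans (min_le_right _ _) (by simp [h1, h2])

theorem good_pvG (heights : List Int) (L : Int) :
    ∀ d j i, i - j = d → j ≤ i → i < heights.length → pvH heights i ≤ L →
      (∀ k, j ≤ k → k < i → pvD heights k ≤ L) → pvG heights j ≤ L := by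
  intro d
  induction d with
  | zero =>
    intro j i hd hji hin hL _
    have : i = j := by omega
    subst this
    rw [pvG]
    split_ifs
    · exact le_trans (min_le_left _ _) hL
    · exact hL
  | succ d ih =>
    intro j i hd hji hin hL hpath
    have hji' : j < i := by omega
    have h1 : pvG heights (j + 1) ≤ L := ih (j + 1) i (by omega) (by omega) hin hL
      (fun k hk1 hk2 => hpath k (by omega) hk2)
    have h2 : pvD heights j ≤ L := hpath j (by omega) hji'
    rw [pvG]
    rw [if_pos (by omega)]
    exact le_trans (min_le_right _ _) (by simp [h1, h2])

theorem alt_ge_zero (heights : List Int) : 0 ≤ shortest_ladder_length_alt heights := by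
  rw [alt_eq]
  exact (PySem.List.le_foldl_max_int (List.range heights.length)
    (fun j => min (pvF heights j) (pvG heights j)) 0).1

theorem alt_feasible (heights : List Int) :
    Feasible heights (shortest_ladder_length_alt heights) := by
  intro j hj
  have hterm : min (pvF heights j) (pvG heights j) ≤ shortest_ladder_length_alt heights := by
    rw [alt_eq]
    exact (PySem.List.le_foldl_max_int (List.range heights.length)
      (fun j => min (pvF heights j) (pvG heights j)) 0).2 j (by simpa using hj)
  rcases min_le_iff.1 hterm with h | h
  · exact Or.inl (pvF_good heights _ j hj h)
  · exact Or.inr (pvG_good heights _ (heights.length - j) j rfl hj h)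

theorem alt_min (heights : List Int) (L : Int) (h0 : 0 ≤ L) (hf : Feasible heights L) :
    shortest_ladder_length_alt heights ≤ L := by
  rw [alt_eq]
  apply pv_foldl_max_le
  · exact h0
  · intro j hj
    have hjn : j < heights.length := by simpa using hj
    rcases hf j hjn with ⟨i, h1, h2, h3⟩ | ⟨i, h1, h1n, h2, h3⟩
    · exact le_trans (min_le_left _ _) (good_pvF heights L j i h1 h2 h3)
    · exact le_trans (min_le_right _ _) (good_pvG heights L (i - j) j i rfl h1 h1n h2 h3)

-- ===== VERDICT (by name: the statement is the Claim_ definition above) =====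
theorem shortest_ladder_length_spec : Claim_equal_shortest_ladder_length := by
  intro heights _hdom hpre
  unfold Spec_shortest_ladder_length
  unfold shortest_ladder_length
  cases hmax : PySem.List.max? heights (fun x => x) with
  | none => exact absurd ((PySem.List.max?_eq_none_iff heights (fun x => x)).1 hmax) hpre
  | some m =>
    show pvSearch heights 0 m = shortest_ladder_length_alt heights
    have hmem : ∀ y ∈ heights, y ≤ m := by
      intro y hy; simpa using PySem.List.max?_isMax hmax y hy
    have hFm : Feasible heights m := by
      intro j hj
      left
      refine ⟨j, le_rfl, ?_, by omega⟩
      have : heights.getD j 0 ∈ heights := by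
        rw [List.getD_eq_getElem heights 0 hj]; exact List.getElem_mem hj
      exact hmem _ this
    by_cases hm0 : 0 ≤ m
    · have hs := pvSearch_spec heights 0 m hm0 ((canReachAll_iff heights m).2 hFm)
      set res := pvSearch heights 0 m with hres
      have hFres : Feasible heights res := (canReachAll_iff heights res).1 hs.2.2.1
      have h1 : shortest_ladder_length_alt heights ≤ res := alt_min heights res hs.1 hFres
      have h2 : res ≤ shortest_ladder_length_alt heights := by
        by_contra hcon
        push Not at hcon
        have hfalse := hs.2.2.2 (shortest_ladder_length_alt heights) (alt_ge_zero heights) hcon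
        have htrue : canReachAll heights (shortest_ladder_length_alt heights) = true :=
          (canReachAll_iff heights _).2 (alt_feasible heights)
        rw [hfalse] at htrue
        exact absurd htrue (by simp)
      omega
    · -- max < 0: the search interval is empty, A returns 0; every height ≤ m < 0 so B's answer is 0
      push Not at hm0
      have hA : pvSearch heights 0 m = 0 := by
        unfold pvSearch
        rw [dif_neg (by omega)]
      have hF0 : Feasible heights 0 := feasible_mono heights (le_of_lt hm0) hFm
      have h1 := alt_min heights 0 le_rfl hF0
      have h2 := alt_ge_zero heights
      omega
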